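-- pv_equiv track=rewrite | github.com/adamritter/lazyviewer | lazyviewer/search/fuzzy.py | fuzzy_match_labels
-- ===== SOURCE A (Python) =====
-- def fuzzy_score(query: str, candidate: str) -> int | None:
--     if not query:
--         return 0
--     query_folded = query.casefold()
--     candidate_folded = candidate.casefold()
--
--     score = 0
--     prev_idx = -1
--     run = 0
--     for needle in query_folded:
--         idx = candidate_folded.find(needle, prev_idx + 1)
--         if idx < 0:
--             return None
--         if idx == prev_idx + 1:
--             run += 1
--             score += 20 + min(16, run * 4)
--         else:
--             gap = idx - prev_idx - 1
--             run = 0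
--             score -= min(40, gap * 2)
--         if idx == 0 or candidate_folded[idx - 1] in "/_- .":
--             score += 35
--         prev_idx = idx
--
--     score -= len(candidate_folded) // 5
--     return score
--
-- def substring_index(query: str, candidate: str) -> int | None:
--     if not query:
--         return 0
--     idx = candidate.casefold().find(query.casefold())
--     if idx < 0:
--         return None
--     return idx
--
-- def fuzzy_match_labels(query: str, labels: list[str], limit: int = 200) -> list[tuple[int, str, int]]:
--     substring_scored: list[tuple[int, int, str, int]] = []
--     for idx, label in enumerate(labels):
--         substr_idx = substring_index(query, label)
--         if substr_idx is None:
--             continue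
--         substring_scored.append((substr_idx, len(label), label, idx))
--     if substring_scored:
--         substring_scored.sort(key=lambda item: (item[0], item[1], item[2]))
--         return [
--             (label_idx, label, 10_000 - (substr_idx * 50) - label_len)
--             for substr_idx, label_len, label, label_idx in substring_scored[: max(1, limit)]
--         ]
--
--     scored: list[tuple[int, int, str, int]] = []
--     for idx, label in enumerate(labels):
--         score = fuzzy_score(query, label)
--         if score is None:
--             continue
--         scored.append((score, len(label), label, idx))
--     scored.sort(key=lambda item: (-item[0], item[1], item[2]))
--     return [(idx, label, score) for score, _, label, idx in scored[: max(1, limit)]]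
-- ===== SOURCE B (Python) =====
-- import heapq
--
-- def _match_indices(query_folded, candidate_folded):
--     """Greedy left-to-right match positions of query chars, or None."""
--     indices = []
--     prev = -1
--     for needle in query_folded:
--         i = candidate_folded.find(needle, prev + 1)
--         if i < 0:
--             return None
--         indices.append(i)
--         prev = i
--     return indices
--
-- def _score_from_indices(candidate_folded, indices):
--     score = 0
--     prev = -1
--     run = 0
--     for i in indices:
--         if i == prev + 1:
--             run += 1
--             score += 20 + min(16, run * 4)
--         else:
--             run = 0
--             score -= min(40, (i - prev - 1) * 2)
--         if i == 0 or candidate_folded[i - 1] in "/_- .":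
--             score += 35
--         prev = i
--     return score - len(candidate_folded) // 5
--
-- def fuzzy_match_labels(query, labels, limit=200):
--     k = max(1, limit)
--     qf = query.casefold()
--     subs = [(pos, len(label), label, idx)
--             for idx, label in enumerate(labels)
--             if (pos := label.casefold().find(qf)) >= 0]
--     if subs:
--         return [(i, lab, 10_000 - p * 50 - n)
--                 for p, n, lab, i in heapq.nsmallest(k, subs)]
--     scored = []
--     for idx, label in enumerate(labels):
--         if not qf:
--             scored.append((0, len(label), label, idx))
--             continue
--         cf = label.casefold()
--         ind = _match_indices(qf, cf)
--         if ind is None: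
--             continue
--         scored.append((-_score_from_indices(cf, ind), len(label), label, idx))
--     return [(i, lab, -negs) for negs, n, lab, i in heapq.nsmallest(k, scored)]
-- ===== Notes on version B (the rewrite author's own statement) =====
-- stated objective: alternative
-- what changed: Each full list.sort(key=...) followed by [:max(1,limit)] is replaced by a bounded-heap selection heapq.nsmallest(max(1,limit), ...) over tuples that carry the tie-breaking enumeration index (no key function), and fuzzy_score is split into a greedy match-index pass plus a separate scoring pass; the selection drops from O(n log n) to O(n log k).
import Mathlib
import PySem

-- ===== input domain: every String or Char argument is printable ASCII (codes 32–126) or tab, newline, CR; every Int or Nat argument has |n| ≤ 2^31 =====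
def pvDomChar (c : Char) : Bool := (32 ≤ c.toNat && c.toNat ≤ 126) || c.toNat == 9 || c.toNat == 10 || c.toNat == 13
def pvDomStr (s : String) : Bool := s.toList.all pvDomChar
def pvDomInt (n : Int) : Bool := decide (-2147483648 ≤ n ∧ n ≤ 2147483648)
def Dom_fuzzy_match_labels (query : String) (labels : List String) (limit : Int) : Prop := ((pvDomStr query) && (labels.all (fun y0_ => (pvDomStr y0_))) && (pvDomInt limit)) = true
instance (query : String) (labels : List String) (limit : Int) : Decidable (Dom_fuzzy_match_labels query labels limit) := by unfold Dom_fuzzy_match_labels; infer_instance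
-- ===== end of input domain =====

-- B replaces each in-place sort-with-key + slice of A by a bounded selection (heapq.nsmallest) over
-- tuples that carry the tie-breaking index, and splits fuzzy_score into match-index collection plus a
-- separate scoring pass (objective: alternative selection data structure; same results).

-- ===== PORT A =====

-- 'c in "/_- ."' for a single char is char membership
def pvSep (c : Char) : Bool := (['/', '_', '-', ' ', '.'] : List Char).contains c

-- the for-loop of fuzzy_score; state (prev_idx, run, score); returns None on a failed find
def pvFsLoop (cand : List Char) (qs : List Char) (prev run score : Int) : Option Int :=
  match qs with
  | [] => some (score - PySem.Int.floordiv (cand.length : Int) 5)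
  | n :: rest =>
    let idx := PySem.Chars.findFrom cand [n] (prev + 1) none
    if idx < 0 then none
    else
      let rs : Int × Int :=
        if idx = prev + 1 then (run + 1, score + (20 + min 16 ((run + 1) * 4)))
        else (0, score - min 40 ((idx - prev - 1) * 2))
      let score2 := if (idx == 0) || ((PySem.List.pyGet? cand (idx - 1)).elim false pvSep) then rs.2 + 35 else rs.2
      pvFsLoop cand rest idx rs.1 score2

-- casefold ported as ASCII lower (exact on the ASCII domain Dom_)
def pv_fuzzy_score (query candidate : String) : Option Int :=
  if query.toList.isEmpty then some 0
  else pvFsLoop (PySem.Chars.lower candidate.toList) (PySem.Chars.lower query.toList) (-1) 0 0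

def pv_substring_index (query candidate : String) : Option Int :=
  if query.toList.isEmpty then some 0
  else
    let idx := PySem.Chars.find (PySem.Chars.lower candidate.toList) (PySem.Chars.lower query.toList)
    if idx < 0 then none else some idx

-- key (item[0], item[1], item[2]) : Python tuple order = lexicographic
def pvKeySub (t : Int × Int × String × Int) : Lex (Int × Lex (Int × String)) :=
  toLex (t.1, toLex (t.2.1, t.2.2.1))

-- key (-item[0], item[1], item[2])
def pvKeyFz (t : Int × Int × String × Int) : Lex (Int × Lex (Int × String)) :=
  toLex (-t.1, toLex (t.2.1, t.2.2.1))

def fuzzy_match_labels (query : String) (labels : List String) (limit : Int) : List (Int × String × Int) :=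
  let substring_scored := (PySem.List.enumerate labels 0).foldl
    (fun acc p => match pv_substring_index query p.2 with
      | none => acc
      | some si => acc ++ [(si, PySem.Str.len p.2, p.2, p.1)]) []
  if !substring_scored.isEmpty then
    (PySem.List.slice (PySem.List.sorted substring_scored pvKeySub) none (some (max 1 limit))).map
      (fun t => (t.2.2.2, t.2.2.1, 10000 - t.1 * 50 - t.2.1))
  else
    let scored := (PySem.List.enumerate labels 0).foldl
      (fun acc p => match pv_fuzzy_score query p.2 with
        | none => acc
        | some s => acc ++ [(s, PySem.Str.len p.2, p.2, p.1)]) []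
    (PySem.List.slice (PySem.List.sorted scored pvKeyFz) none (some (max 1 limit))).map
      (fun t => (t.2.2.2, t.2.2.1, t.1))

-- ===== PORT B =====

-- Python's built-in ordering on the 4-tuples (no key function): lexicographic
def pvTupKey (t : Int × Int × String × Int) : Lex (Int × Lex (Int × Lex (String × Int))) :=
  toLex (t.1, toLex (t.2.1, toLex (t.2.2.1, t.2.2.2)))

-- heapq.nsmallest(n, xs) ported by its documented contract sorted(xs)[:n]
def pvNsmallest (n : Int) (xs : List (Int × Int × String × Int)) : List (Int × Int × String × Int) :=
  (PySem.List.sorted xs pvTupKey).take n.toNat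

-- _match_indices: greedy positions of the query chars, or None
def pvMatchIndices (qs : List Char) (cand : List Char) (prev : Int) : Option (List Int) :=
  match qs with
  | [] => some []
  | n :: rest =>
    let i := PySem.Chars.findFrom cand [n] (prev + 1) none
    if i < 0 then none
    else (pvMatchIndices rest cand i).map (fun l => i :: l)

-- one step of _score_from_indices; state (prev, run, score)
def pvScoreStep (cand : List Char) (st : Int × Int × Int) (i : Int) : Int × Int × Int :=
  let rs : Int × Int :=
    if i = st.1 + 1 then (st.2.1 + 1, st.2.2 + (20 + min 16 ((st.2.1 + 1) * 4)))
    else (0, st.2.2 - min 40 ((i - st.1 - 1) * 2))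
  let score2 := if (i == 0) || ((PySem.List.pyGet? cand (i - 1)).elim false pvSep) then rs.2 + 35 else rs.2
  (i, rs.1, score2)

def pvScoreFrom (cand : List Char) (ind : List Int) : Int :=
  (ind.foldl (pvScoreStep cand) (-1, 0, 0)).2.2 - PySem.Int.floordiv (cand.length : Int) 5

def fuzzy_match_labels_alt (query : String) (labels : List String) (limit : Int) : List (Int × String × Int) :=
  let k := max 1 limit
  let qf := PySem.Chars.lower query.toList
  let subs := (PySem.List.enumerate labels 0).foldl
    (fun acc p =>
      let pos := PySem.Chars.find (PySem.Chars.lower p.2.toList) qf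
      if 0 ≤ pos then acc ++ [(pos, PySem.Str.len p.2, p.2, p.1)] else acc) []
  if !subs.isEmpty then
    (pvNsmallest k subs).map (fun t => (t.2.2.2, t.2.2.1, 10000 - t.1 * 50 - t.2.1))
  else
    let scored := (PySem.List.enumerate labels 0).foldl
      (fun acc p =>
        if qf.isEmpty then acc ++ [(0, PySem.Str.len p.2, p.2, p.1)]
        else
          match pvMatchIndices qf (PySem.Chars.lower p.2.toList) (-1) with
          | none => acc
          | some ind => acc ++ [(-(pvScoreFrom (PySem.Chars.lower p.2.toList) ind), PySem.Str.len p.2, p.2, p.1)]) []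
    (pvNsmallest k scored).map (fun t => (t.2.2.2, t.2.2.1, -t.1))

-- ===== PRECONDITION & SPEC =====
def Spec_fuzzy_match_labels (query : String) (labels : List String) (limit : Int) (out : List (Int × String × Int)) : Prop := out = fuzzy_match_labels_alt query labels limit
instance (query : String) (labels : List String) (limit : Int) (out : List (Int × String × Int)) : Decidable (Spec_fuzzy_match_labels query labels limit out) := by unfold Spec_fuzzy_match_labels; infer_instance

-- ===== CLAIM (what is proved, stated in full; the proofs are below) =====
def Claim_equal_fuzzy_match_labels : Prop := ∀ (query : String) (labels : List String) (limit : Int), Dom_fuzzy_match_labels query labels limit → Spec_fuzzy_match_labels query labels limit (fuzzy_match_labels query labels limit)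

-- ===== LEMMAS AND PROOFS =====

-- stability order: strictly smaller key, or equal key and earlier original position
def pvR {K : Type} [LinearOrder K] (key : Int × Int × String × Int → K)
    (a b : Int × Int × String × Int) : Prop :=
  key a < key b ∨ (key a = key b ∧ a.2.2.2 < b.2.2.2)

theorem pvInsertBy_pairwise {K : Type} [LinearOrder K] (key : Int × Int × String × Int → K)
    (x : Int × Int × String × Int) (acc : List (Int × Int × String × Int))
    (hp : acc.Pairwise (pvR key)) (hx : ∀ a ∈ acc, a.2.2.2 < x.2.2.2) :
    (PySem.List.insertBy (fun a b => decide (key a < key b)) x acc).Pairwise (pvR key) := by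
  induction acc with
  | nil => simp [PySem.List.insertBy]
  | cons y ys ih =>
    rw [List.pairwise_cons] at hp
    obtain ⟨hy, hys⟩ := hp
    by_cases hb : key x < key y
    · have : PySem.List.insertBy (fun a b => decide (key a < key b)) x (y :: ys) = x :: y :: ys := by
        simp [PySem.List.insertBy, hb]
      rw [this, List.pairwise_cons]
      refine ⟨?_, by rw [List.pairwise_cons]; exact ⟨hy, hys⟩⟩
      intro a ha
      rcases List.mem_cons.mp ha with rfl | ha
      · exact Or.inl hb
      · rcases hy a ha with h1 | ⟨h1, _⟩
        · exact Or.inl (lt_trans hb h1)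
        · exact Or.inl (h1 ▸ hb)
    · have : PySem.List.insertBy (fun a b => decide (key a < key b)) x (y :: ys) =
        y :: PySem.List.insertBy (fun a b => decide (key a < key b)) x ys := by
        simp [PySem.List.insertBy, hb]
      rw [this, List.pairwise_cons]
      refine ⟨?_, ih hys (fun a ha => hx a (List.mem_cons_of_mem _ ha))⟩
      intro a ha
      rcases (PySem.List.mem_insertBy _ _ _ _).mp ha with rfl | ha
      · rcases lt_or_eq_of_le (le_of_not_gt hb) with h1 | h1
        · exact Or.inl h1
        · exact Or.inr ⟨h1, hx y (List.mem_cons_self)⟩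
      · exact hy a ha

theorem pvFoldl_stable {K : Type} [LinearOrder K] (key : Int × Int × String × Int → K) :
    ∀ (l acc : List (Int × Int × String × Int)),
      acc.Pairwise (pvR key) →
      (∀ a ∈ acc, ∀ b ∈ l, a.2.2.2 < b.2.2.2) →
      l.Pairwise (fun a b => a.2.2.2 < b.2.2.2) →
      (l.foldl (fun acc x => PySem.List.insertBy (fun a b => decide (key a < key b)) x acc) acc).Pairwise (pvR key) := by
  intro l
  induction l with
  | nil => intro acc h1 _ _; simpa using h1
  | cons x rest ih =>
    intro acc h1 h2 h3
    rw [List.pairwise_cons] at h3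
    obtain ⟨hx3, h3'⟩ := h3
    simp only [List.foldl_cons]
    apply ih
    · exact pvInsertBy_pairwise key x acc h1 (fun a ha => h2 a ha x (List.mem_cons_self))
    · intro a ha b hb
      rcases (PySem.List.mem_insertBy _ _ _ _).mp ha with rfl | ha
      · exact hx3 b hb
      · exact h2 a ha b (List.mem_cons_of_mem _ hb)
    · exact h3'

-- a stable sort over a position-increasing list is ordered by (key, position)
theorem pvSorted_stable {K : Type} [LinearOrder K] (key : Int × Int × String × Int → K)
    (xs : List (Int × Int × String × Int)) (h : xs.Pairwise (fun a b => a.2.2.2 < b.2.2.2)) :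
    (PySem.List.sorted xs key).Pairwise (pvR key) := by
  rw [PySem.List.sorted_eq_foldl_insertBy]
  exact pvFoldl_stable key xs [] (by simp) (by simp) h

-- fsLoop = match-indices then score (B's loop fission)
theorem pvFsLoop_eq (cand : List Char) (qs : List Char) :
    ∀ (prev run score : Int),
      pvFsLoop cand qs prev run score =
        (pvMatchIndices qs cand prev).map
          (fun ind => (ind.foldl (pvScoreStep cand) (prev, run, score)).2.2
            - PySem.Int.floordiv (cand.length : Int) 5) := by
  induction qs with
  | nil => intro prev run score; simp [pvFsLoop, pvMatchIndices]
  | cons n rest ih =>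
    intro prev run score
    simp only [pvFsLoop, pvMatchIndices]
    by_cases h : PySem.Chars.findFrom cand [n] (prev + 1) none < 0
    · simp [h]
    · simp only [h, ih]
      cases hmi : pvMatchIndices rest cand (PySem.Chars.findFrom cand [n] (prev + 1) none) with
      | none => simp
      | some l => simp [pvScoreStep]

theorem pvTupKey_inj : Function.Injective pvTupKey := by
  intro a b h
  obtain ⟨a1, a2, a3, a4⟩ := a
  obtain ⟨b1, b2, b3, b4⟩ := b
  simp [pvTupKey, Prod.ext_iff] at h
  simp [Prod.ext_iff]
  exact h

theorem pvSub_le (a b : Int × Int × String × Int) (h : pvR pvKeySub a b) : pvTupKey a ≤ pvTupKey b := by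
  obtain ⟨a1, a2, a3, a4⟩ := a
  obtain ⟨b1, b2, b3, b4⟩ := b
  simp only [pvR, pvKeySub, pvTupKey, Prod.Lex.lt_iff, Prod.Lex.le_iff, ofLex_toLex,
    toLex_inj, Prod.ext_iff] at h ⊢
  rcases h with (h | ⟨e1, (h | ⟨e2, h⟩)⟩) | ⟨⟨e1, e2, e3⟩, h4⟩
  · exact Or.inl h
  · exact Or.inr ⟨e1, Or.inl h⟩
  · exact Or.inr ⟨e1, Or.inr ⟨e2, Or.inl h⟩⟩
  · exact Or.inr ⟨e1, Or.inr ⟨e2, Or.inr ⟨e3, le_of_lt h4⟩⟩⟩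

theorem pvFz_le (a b : Int × Int × String × Int) (h : pvR pvKeyFz a b) :
    pvTupKey (-a.1, a.2) ≤ pvTupKey (-b.1, b.2) := by
  obtain ⟨a1, a2, a3, a4⟩ := a
  obtain ⟨b1, b2, b3, b4⟩ := b
  simp only [pvR, pvKeyFz, pvTupKey, Prod.Lex.lt_iff, Prod.Lex.le_iff, ofLex_toLex,
    toLex_inj, Prod.ext_iff] at h ⊢
  rcases h with (h | ⟨e1, (h | ⟨e2, h⟩)⟩) | ⟨⟨e1, e2, e3⟩, h4⟩
  · exact Or.inl h
  · exact Or.inr ⟨e1, Or.inl h⟩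
  · exact Or.inr ⟨e1, Or.inr ⟨e2, Or.inl h⟩⟩
  · exact Or.inr ⟨e1, Or.inr ⟨e2, Or.inr ⟨e3, le_of_lt h4⟩⟩⟩

-- canonical flatMap forms of the two candidate lists
def pvNegF (t : Int × Int × String × Int) : Int × Int × String × Int := (-t.1, t.2)

def pvGSub (query : String) (p : Int × String) : List (Int × Int × String × Int) :=
  match pv_substring_index query p.2 with
  | none => []
  | some si => [(si, PySem.Str.len p.2, p.2, p.1)]

def pvGFz (query : String) (p : Int × String) : List (Int × Int × String × Int) :=
  match pv_fuzzy_score query p.2 with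
  | none => []
  | some s => [(s, PySem.Str.len p.2, p.2, p.1)]

def pvSubList (query : String) (labels : List String) : List (Int × Int × String × Int) :=
  (PySem.List.enumerate labels 0).flatMap (pvGSub query)

def pvFzList (query : String) (labels : List String) : List (Int × Int × String × Int) :=
  (PySem.List.enumerate labels 0).flatMap (pvGFz query)

theorem pvA_subfold (query : String) (labels : List String) :
    (PySem.List.enumerate labels 0).foldl
      (fun acc p => match pv_substring_index query p.2 with
        | none => acc
        | some si => acc ++ [(si, PySem.Str.len p.2, p.2, p.1)]) [] = pvSubList query labels := by
  rw [PySem.List.foldl_congr_mem _ _ (fun acc p => acc ++ pvGSub query p) _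
    (by intro acc p _; cases h : pv_substring_index query p.2 <;> simp [pvGSub, h])]
  rw [PySem.List.foldl_append_eq_flatMap]
  rfl

theorem pvA_fzfold (query : String) (labels : List String) :
    (PySem.List.enumerate labels 0).foldl
      (fun acc p => match pv_fuzzy_score query p.2 with
        | none => acc
        | some s => acc ++ [(s, PySem.Str.len p.2, p.2, p.1)]) [] = pvFzList query labels := by
  rw [PySem.List.foldl_congr_mem _ _ (fun acc p => acc ++ pvGFz query p) _
    (by intro acc p _; cases h : pv_fuzzy_score query p.2 <;> simp [pvGFz, h])]
  rw [PySem.List.foldl_append_eq_flatMap]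
  rfl

theorem pvB_subfold (query : String) (labels : List String) :
    (PySem.List.enumerate labels 0).foldl
      (fun acc p =>
        let pos := PySem.Chars.find (PySem.Chars.lower p.2.toList) (PySem.Chars.lower query.toList)
        if 0 ≤ pos then acc ++ [(pos, PySem.Str.len p.2, p.2, p.1)] else acc) [] = pvSubList query labels := by
  rw [PySem.List.foldl_congr_mem _ _ (fun acc p => acc ++ pvGSub query p) _ ?_]
  · rw [PySem.List.foldl_append_eq_flatMap]; rfl
  · intro acc p _
    by_cases hq : query.toList.isEmpty
    · have hq' : query.toList = [] := List.isEmpty_iff.mp hq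
      simp [pvGSub, pv_substring_index, hq', PySem.Chars.lower, PySem.Chars.find_nil]
    · by_cases hneg : PySem.Chars.find (PySem.Chars.lower p.2.toList) (PySem.Chars.lower query.toList) < 0
      · simp [pvGSub, pv_substring_index, hq, hneg, not_le.mpr hneg]
      · simp [pvGSub, pv_substring_index, hq, hneg, not_lt.mp hneg]

theorem pvB_fzfold (query : String) (labels : List String) :
    (PySem.List.enumerate labels 0).foldl
      (fun acc p =>
        if (PySem.Chars.lower query.toList).isEmpty then acc ++ [(0, PySem.Str.len p.2, p.2, p.1)]
        else
          match pvMatchIndices (PySem.Chars.lower query.toList) (PySem.Chars.lower p.2.toList) (-1) with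
          | none => acc
          | some ind => acc ++ [(-(pvScoreFrom (PySem.Chars.lower p.2.toList) ind), PySem.Str.len p.2, p.2, p.1)]) []
      = (pvFzList query labels).map pvNegF := by
  rw [PySem.List.foldl_congr_mem _ _ (fun acc p => acc ++ (pvGFz query p).map pvNegF) _ ?_]
  · rw [PySem.List.foldl_append_eq_flatMap]
    simp [pvFzList, List.map_flatMap]
  · intro acc p _
    by_cases hq : query.toList.isEmpty
    · have hq' : query.toList = [] := List.isEmpty_iff.mp hq
      simp [pvGFz, pv_fuzzy_score, hq', PySem.Chars.lower, pvNegF]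
    · have hqf : (PySem.Chars.lower query.toList).isEmpty = false := by
        simpa [PySem.Chars.lower] using hq
      have hfs : pv_fuzzy_score query p.2 =
          (pvMatchIndices (PySem.Chars.lower query.toList) (PySem.Chars.lower p.2.toList) (-1)).map
            (pvScoreFrom (PySem.Chars.lower p.2.toList)) := by
        rw [pv_fuzzy_score, if_neg (by simpa using hq), pvFsLoop_eq]
        rfl
      rw [hqf]
      cases hmi : pvMatchIndices (PySem.Chars.lower query.toList) (PySem.Chars.lower p.2.toList) (-1) with
      | none => simp [pvGFz, hfs, hmi]
      | some ind => simp [pvGFz, hfs, hmi, pvNegF]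

theorem pvSubList_pos (query : String) (labels : List String) :
    (pvSubList query labels).Pairwise (fun a b => a.2.2.2 < b.2.2.2) := by
  rw [pvSubList, List.pairwise_flatMap]
  constructor
  · intro p _; cases h : pv_substring_index query p.2 <;> simp [pvGSub, h]
  · refine (PySem.List.pairwise_lt_enumerate labels 0).imp ?_
    intro p q hpq x hx y hy
    have hx' : x.2.2.2 = p.1 := by
      cases h : pv_substring_index query p.2 <;> simp [pvGSub, h] at hx
      simp [hx]
    have hy' : y.2.2.2 = q.1 := by
      cases h : pv_substring_index query q.2 <;> simp [pvGSub, h] at hy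
      simp [hy]
    rw [hx', hy']; exact hpq

theorem pvFzList_pos (query : String) (labels : List String) :
    (pvFzList query labels).Pairwise (fun a b => a.2.2.2 < b.2.2.2) := by
  rw [pvFzList, List.pairwise_flatMap]
  constructor
  · intro p _; cases h : pv_fuzzy_score query p.2 <;> simp [pvGFz, h]
  · refine (PySem.List.pairwise_lt_enumerate labels 0).imp ?_
    intro p q hpq x hx y hy
    have hx' : x.2.2.2 = p.1 := by
      cases h : pv_fuzzy_score query p.2 <;> simp [pvGFz, h] at hx
      simp [hx]
    have hy' : y.2.2.2 = q.1 := by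
      cases h : pv_fuzzy_score query q.2 <;> simp [pvGFz, h] at hy
      simp [hy]
    rw [hx', hy']; exact hpq

-- the stable key-sorts of A coincide with B's plain tuple sorts
theorem pvSortSubEq (xs : List (Int × Int × String × Int))
    (h : xs.Pairwise (fun a b => a.2.2.2 < b.2.2.2)) :
    PySem.List.sorted xs pvKeySub = PySem.List.sorted xs pvTupKey := by
  refine PySem.List.eq_of_perm_of_pairwise_le_of_injective pvTupKey pvTupKey_inj
    ((PySem.List.sorted_perm _ _ _).trans (PySem.List.sorted_perm _ _ _).symm) ?_ ?_
  · exact (pvSorted_stable pvKeySub xs h).imp (fun hr => pvSub_le _ _ hr)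
  · exact PySem.List.sorted_pairwise _ _

theorem pvSortFzEq (xs : List (Int × Int × String × Int))
    (h : xs.Pairwise (fun a b => a.2.2.2 < b.2.2.2)) :
    PySem.List.sorted (xs.map pvNegF) pvTupKey = (PySem.List.sorted xs pvKeyFz).map pvNegF := by
  refine PySem.List.eq_of_perm_of_pairwise_le_of_injective pvTupKey pvTupKey_inj
    ((PySem.List.sorted_perm _ _ _).trans ((PySem.List.sorted_perm xs pvKeyFz false).map pvNegF).symm) ?_ ?_
  · exact PySem.List.sorted_pairwise _ _
  · rw [List.pairwise_map]
    exact (pvSorted_stable pvKeyFz xs h).imp (fun hr => pvFz_le _ _ hr)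

theorem pvMain (query : String) (labels : List String) (limit : Int) :
    fuzzy_match_labels query labels limit = fuzzy_match_labels_alt query labels limit := by
  have hm : (0 : Int) ≤ max 1 limit := le_trans zero_le_one (le_max_left _ _)
  unfold fuzzy_match_labels fuzzy_match_labels_alt
  simp only [pvA_subfold, pvA_fzfold, pvB_subfold, pvB_fzfold]
  by_cases hne : (pvSubList query labels).isEmpty
  · have hc : (!(pvSubList query labels).isEmpty) = false := by simp [hne]
    rw [hc]
    simp only [Bool.false_eq_true, if_false]
    rw [PySem.List.slice_to _ hm, pvNsmallest, pvSortFzEq _ (pvFzList_pos query labels),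
      ← List.map_take, List.map_map]
    apply List.map_congr_left
    intro t _
    simp [pvNegF]
  · have hc : (!(pvSubList query labels).isEmpty) = true := by simp [hne]
    rw [hc]
    simp only [if_true]
    rw [PySem.List.slice_to _ hm, pvNsmallest, pvSortSubEq _ (pvSubList_pos query labels)]

-- ===== VERDICT (by name: the statement is the Claim_ definition above) =====
theorem fuzzy_match_labels_spec : Claim_equal_fuzzy_match_labels := by
  intro query labels limit _
  unfold Spec_fuzzy_match_labels
  exact pvMain query labels limit
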